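-- pv_equiv track=rewrite | github.com/sofatsahil/crop_agent | crop_agent/main.py | categorize_crops
-- ===== SOURCE A (Python) =====
-- def categorize_crops(crops):
--     categories = {
--         "Vegetables": [],
--         "Fruits & Nuts": [],
--         "Grains & Forage": []
--     }
--
--     vegetable_keywords = [
--         'lettuce', 'spinach', 'cabbage', 'carrot', 'tomato', 'pepper', 'broccoli',
--         'cauliflower', 'celery', 'onion', 'cucumber', 'eggplant', 'pea', 'kale',
--         'cilantro', 'endive', 'escarole', 'fennel', 'mizuna', 'arugula', 'bok choy',
--         'chinese cabbage', 'napa cabbage', 'pak choi', 'brussels sprouts', 'artichoke',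
--         'zucchini', 'watermelon', 'chili', 'cherry tomato', 'processing tomato',
--         'red bell pepper', 'hibiscus'
--     ]
--
--     fruit_nut_keywords = [
--         'strawberry', 'grape', 'almond', 'walnut', 'pistachio', 'orange',
--         'lemon', 'mandarin', 'pear', 'prune', 'raspberry'
--     ]
--
--     grain_forage_keywords = ['alfalfa', 'corn']
--
--     for crop in crops:
--         if any(keyword in crop for keyword in vegetable_keywords):
--             categories["Vegetables"].append(crop)
--         elif any(keyword in crop for keyword in fruit_nut_keywords):
--             categories["Fruits & Nuts"].append(crop)
--         elif any(keyword in crop for keyword in grain_forage_keywords):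
--             categories["Grains & Forage"].append(crop)
--         else:
--             categories["Vegetables"].append(crop)
--
--     for category in categories:
--         categories[category].sort()
--
--     return categories
-- ===== SOURCE B (Python) =====
-- _VEG = [
--     'lettuce', 'spinach', 'cabbage', 'carrot', 'tomato', 'pepper', 'broccoli',
--     'cauliflower', 'celery', 'onion', 'cucumber', 'eggplant', 'pea', 'kale',
--     'cilantro', 'endive', 'escarole', 'fennel', 'mizuna', 'arugula', 'bok choy',
--     'chinese cabbage', 'napa cabbage', 'pak choi', 'brussels sprouts', 'artichoke',
--     'zucchini', 'watermelon', 'chili', 'cherry tomato', 'processing tomato',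
--     'red bell pepper', 'hibiscus'
-- ]
-- _FRUIT = [
--     'strawberry', 'grape', 'almond', 'walnut', 'pistachio', 'orange',
--     'lemon', 'mandarin', 'pear', 'prune', 'raspberry'
-- ]
-- _GRAIN = ['alfalfa', 'corn']
--
-- # One flat keyword -> priority map (0 = Vegetables, 1 = Fruits & Nuts, 2 = Grains & Forage).
-- _KW_PRIORITY = {}
-- for _p, _kws in enumerate([_VEG, _FRUIT, _GRAIN]):
--     for _kw in _kws:
--         _KW_PRIORITY[_kw] = _p
--
-- _NAMES = ["Vegetables", "Fruits & Nuts", "Grains & Forage"]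
--
--
-- def _priority(crop):
--     # Best (smallest) priority among all matching keywords; unmatched crops default to 0.
--     return min((p for kw, p in _KW_PRIORITY.items() if kw in crop), default=0)
--
--
-- def categorize_crops(crops):
--     # Sort once globally, then partition the sorted list: stable order makes
--     # each per-category slice already sorted.
--     ordered = sorted(crops)
--     return {name: [c for c in ordered if _priority(c) == i]
--             for i, name in enumerate(_NAMES)}
-- ===== Notes on version B (the rewrite author's own statement) =====
-- stated objective: alternative
-- what changed: Replaces A's classify-then-sort-each-bucket if/elif chain by a sort-once-then-partition pass: a single flat keyword->priority dict is reduced with min(default=0) to a numeric category, and the globally sorted list is partitioned into the three categories by that priority.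
import Mathlib
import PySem

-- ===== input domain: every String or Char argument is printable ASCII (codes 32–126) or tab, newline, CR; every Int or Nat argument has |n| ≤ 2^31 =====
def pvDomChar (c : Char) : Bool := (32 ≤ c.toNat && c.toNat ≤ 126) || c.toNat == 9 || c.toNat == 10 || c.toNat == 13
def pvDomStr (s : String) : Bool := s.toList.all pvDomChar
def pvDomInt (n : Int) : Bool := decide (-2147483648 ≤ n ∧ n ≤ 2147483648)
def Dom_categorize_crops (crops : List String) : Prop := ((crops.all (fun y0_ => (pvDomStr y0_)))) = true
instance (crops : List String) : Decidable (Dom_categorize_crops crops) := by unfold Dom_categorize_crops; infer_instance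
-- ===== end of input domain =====

-- B sorts the whole input once and partitions the sorted list by a numeric priority computed
-- with min over a flat keyword->priority dict, instead of A's classify-then-sort-each-bucket
-- if/elif chain (objective: alternative). Equivalence is about the returned dict.

-- ===== PORT A =====
def pvVegKw : List String :=
  ["lettuce", "spinach", "cabbage", "carrot", "tomato", "pepper", "broccoli",
   "cauliflower", "celery", "onion", "cucumber", "eggplant", "pea", "kale",
   "cilantro", "endive", "escarole", "fennel", "mizuna", "arugula", "bok choy",
   "chinese cabbage", "napa cabbage", "pak choi", "brussels sprouts", "artichoke",
   "zucchini", "watermelon", "chili", "cherry tomato", "processing tomato",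
   "red bell pepper", "hibiscus"]

def pvFruitKw : List String :=
  ["strawberry", "grape", "almond", "walnut", "pistachio", "orange",
   "lemon", "mandarin", "pear", "prune", "raspberry"]

def pvGrainKw : List String := ["alfalfa", "corn"]

def categorize_crops (crops : List String) : List (String × List String) :=
  let categories : PySem.Dict String (List String) :=
    PySem.Dict.mk [("Vegetables", []), ("Fruits & Nuts", []), ("Grains & Forage", [])]
  let categories := crops.foldl (fun d crop =>
    if pvVegKw.any (fun keyword => PySem.Str.isIn keyword crop) then
      d.modify "Vegetables" [] (fun l => l ++ [crop])
    else if pvFruitKw.any (fun keyword => PySem.Str.isIn keyword crop) then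
      d.modify "Fruits & Nuts" [] (fun l => l ++ [crop])
    else if pvGrainKw.any (fun keyword => PySem.Str.isIn keyword crop) then
      d.modify "Grains & Forage" [] (fun l => l ++ [crop])
    else
      d.modify "Vegetables" [] (fun l => l ++ [crop])) categories
  let categories := categories.keys.foldl
    (fun d category => d.modify category [] (fun l => PySem.List.sorted l (fun x => x) false))
    categories
  categories.items

-- ===== PORT B =====
-- _KW_PRIORITY: one flat keyword -> priority dict built by the nested loop of Source B.
def pvKwPriority : PySem.Dict String Int :=
  (PySem.List.enumerate [pvVegKw, pvFruitKw, pvGrainKw]).foldl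
    (fun d p => p.2.foldl (fun d kw => d.insert kw p.1) d) PySem.Dict.empty

def pvNames : List String := ["Vegetables", "Fruits & Nuts", "Grains & Forage"]

-- _priority: min over the matching entries of the flat dict, default 0.
def pvPriority (crop : String) : Int :=
  PySem.List.minD
    (((pvKwPriority.items).filter (fun p => PySem.Str.isIn p.1 crop)).map Prod.snd)
    (fun x => x) 0

def categorize_crops_alt (crops : List String) : List (String × List String) :=
  let ordered := PySem.List.sorted crops (fun x => x) false
  (PySem.Dict.ofList ((PySem.List.enumerate pvNames).map
    (fun p => (p.2, ordered.filter (fun c => pvPriority c == p.1))))).items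

-- ===== PRECONDITION & SPEC =====
def Spec_categorize_crops (crops : List String) (out : List (String × List String)) : Prop := out = categorize_crops_alt crops
instance (crops : List String) (out : List (String × List String)) : Decidable (Spec_categorize_crops crops out) := by unfold Spec_categorize_crops; infer_instance

-- ===== CLAIM (what is proved, stated in full; the proofs are below) =====
def Claim_equal_categorize_crops : Prop := ∀ (crops : List String), Dom_categorize_crops crops → Spec_categorize_crops crops (categorize_crops crops)

-- ===== LEMMAS AND PROOFS =====

-- Proof-side name for A's if/elif chain as a numeric category.
def pvCat (crop : String) : Int :=
  if pvVegKw.any (fun k => PySem.Str.isIn k crop) then 0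
  else if pvFruitKw.any (fun k => PySem.Str.isIn k crop) then 1
  else if pvGrainKw.any (fun k => PySem.Str.isIn k crop) then 2
  else 0

-- The flat dict's items are the three keyword lists tagged with their priority, in order.
set_option maxRecDepth 100000 in
lemma pv_items_eq :
    pvKwPriority.items =
      pvVegKw.map (fun k => (k, (0 : Int))) ++ pvFruitKw.map (fun k => (k, (1 : Int)))
        ++ pvGrainKw.map (fun k => (k, (2 : Int))) := by decide

-- Filtering a tagged keyword list and projecting the tag yields a constant list.
lemma pv_tagged_filter (kws : List String) (p : Int) (crop : String) :
    ((kws.map (fun k => (k, p))).filter (fun q => PySem.Str.isIn q.1 crop)).map Prod.snd =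
      (kws.filter (fun k => PySem.Str.isIn k crop)).map (fun _ => p) := by
  simp only [List.filter_map, List.map_map]
  rfl

-- min(default=0) over the matching priorities equals A's first-match chain.
lemma pv_priority_eq_cat (crop : String) : pvPriority crop = pvCat crop := by
  have hxs :
      ((pvKwPriority.items).filter (fun p => PySem.Str.isIn p.1 crop)).map Prod.snd =
        (pvVegKw.filter (fun k => PySem.Str.isIn k crop)).map (fun _ => (0 : Int))
          ++ (pvFruitKw.filter (fun k => PySem.Str.isIn k crop)).map (fun _ => (1 : Int))
          ++ (pvGrainKw.filter (fun k => PySem.Str.isIn k crop)).map (fun _ => (2 : Int)) := by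
    rw [pv_items_eq]
    simp only [List.filter_append, List.map_append]
    rw [pv_tagged_filter, pv_tagged_filter, pv_tagged_filter]
  set l0 := (pvVegKw.filter (fun k => PySem.Str.isIn k crop)) with hl0
  set l1 := (pvFruitKw.filter (fun k => PySem.Str.isIn k crop)) with hl1
  set l2 := (pvGrainKw.filter (fun k => PySem.Str.isIn k crop)) with hl2
  set xs := l0.map (fun _ => (0 : Int)) ++ l1.map (fun _ => (1 : Int))
      ++ l2.map (fun _ => (2 : Int)) with hxsdef
  have hmem : ∀ x ∈ xs, x = 0 ∨ x = 1 ∨ x = 2 := by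
    intro x hx
    rcases List.mem_append.mp hx with hx | hx
    · rcases List.mem_append.mp hx with hx | hx
      · rcases List.mem_map.mp hx with ⟨a, _, rfl⟩; simp
      · rcases List.mem_map.mp hx with ⟨a, _, rfl⟩; simp
    · rcases List.mem_map.mp hx with ⟨a, _, rfl⟩; simp
  have hany0 : pvVegKw.any (fun k => PySem.Str.isIn k crop) = true ↔ l0 ≠ [] := by
    rw [hl0]; simp [List.any_eq_true, List.filter_eq_nil_iff]
  have hany1 : pvFruitKw.any (fun k => PySem.Str.isIn k crop) = true ↔ l1 ≠ [] := by
    rw [hl1]; simp [List.any_eq_true, List.filter_eq_nil_iff]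
  have hany2 : pvGrainKw.any (fun k => PySem.Str.isIn k crop) = true ↔ l2 ≠ [] := by
    rw [hl2]; simp [List.any_eq_true, List.filter_eq_nil_iff]
  unfold pvPriority pvCat
  rw [hxs]
  by_cases h0 : pvVegKw.any (fun k => PySem.Str.isIn k crop) = true
  · -- 0 is in xs, so the min is 0
    rw [if_pos h0]
    rcases List.exists_mem_of_ne_nil l0 (hany0.mp h0) with ⟨a, ha⟩
    have h0mem : (0 : Int) ∈ xs :=
      List.mem_append.mpr (Or.inl (List.mem_append.mpr
        (Or.inl (List.mem_map.mpr ⟨a, ha, rfl⟩))))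
    obtain ⟨m, hm⟩ : ∃ m, PySem.List.min? xs (fun x => x) = some m := by
      cases hmin : PySem.List.min? xs (fun x => x) with
      | none => exact absurd ((PySem.List.min?_eq_none_iff xs _).mp hmin ▸ h0mem) (by simp)
      | some m => exact ⟨m, rfl⟩
    have hle := PySem.List.min?_isMin hm 0 h0mem
    have hmmem := hmem m (PySem.List.min?_mem hm)
    have : m = 0 := by omega
    simp [PySem.List.minD, hm, this]
  · rw [if_neg h0]
    have hl0nil : l0 = [] := by
      by_contra hne; exact h0 (hany0.mpr hne)
    by_cases h1 : pvFruitKw.any (fun k => PySem.Str.isIn k crop) = true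
    · rw [if_pos h1]
      rcases List.exists_mem_of_ne_nil l1 (hany1.mp h1) with ⟨a, ha⟩
      have h1mem : (1 : Int) ∈ xs :=
        List.mem_append.mpr (Or.inl (List.mem_append.mpr
          (Or.inr (List.mem_map.mpr ⟨a, ha, rfl⟩))))
      obtain ⟨m, hm⟩ : ∃ m, PySem.List.min? xs (fun x => x) = some m := by
        cases hmin : PySem.List.min? xs (fun x => x) with
        | none => exact absurd ((PySem.List.min?_eq_none_iff xs _).mp hmin ▸ h1mem) (by simp)
        | some m => exact ⟨m, rfl⟩
      have hle := PySem.List.min?_isMin hm 1 h1mem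
      have hnot0 : m ≠ 0 := by
        intro h
        have h0in : (0 : Int) ∈ xs := h ▸ PySem.List.min?_mem hm
        rw [hxsdef, hl0nil] at h0in
        rcases List.mem_append.mp h0in with hx | hx
        · rcases List.mem_append.mp hx with hx | hx
          · simp at hx
          · rcases List.mem_map.mp hx with ⟨a, _, h⟩; exact absurd h (by norm_num)
        · rcases List.mem_map.mp hx with ⟨a, _, h⟩; exact absurd h (by norm_num)
      have hmmem := hmem m (PySem.List.min?_mem hm)
      have : m = 1 := by omega
      simp [PySem.List.minD, hm, this]
    · rw [if_neg h1]
      have hl1nil : l1 = [] := by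
        by_contra hne; exact h1 (hany1.mpr hne)
      by_cases h2 : pvGrainKw.any (fun k => PySem.Str.isIn k crop) = true
      · rw [if_pos h2]
        rcases List.exists_mem_of_ne_nil l2 (hany2.mp h2) with ⟨a, ha⟩
        have h2mem : (2 : Int) ∈ xs :=
          List.mem_append.mpr (Or.inr (List.mem_map.mpr ⟨a, ha, rfl⟩))
        obtain ⟨m, hm⟩ : ∃ m, PySem.List.min? xs (fun x => x) = some m := by
          cases hmin : PySem.List.min? xs (fun x => x) with
          | none => exact absurd ((PySem.List.min?_eq_none_iff xs _).mp hmin ▸ h2mem) (by simp)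
          | some m => exact ⟨m, rfl⟩
        have hmmem' := PySem.List.min?_mem hm
        rw [hxsdef, hl0nil, hl1nil] at hmmem'
        simp only [List.map_nil, List.nil_append] at hmmem'
        rcases List.mem_map.mp hmmem' with ⟨a, _, h⟩
        simp [PySem.List.minD, hm, ← h]
      · rw [if_neg h2]
        have hl2nil : l2 = [] := by
          by_contra hne; exact h2 (hany2.mpr hne)
        rw [hxsdef, hl0nil, hl1nil, hl2nil]
        simp [PySem.List.minD, PySem.List.min?]

-- A's crop loop appends to each bucket exactly the crops of that numeric category.
lemma pv_fold_inv (crops : List String) (a b c : List String) :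
    crops.foldl (fun d crop =>
      if pvVegKw.any (fun keyword => PySem.Str.isIn keyword crop) then
        d.modify "Vegetables" [] (fun l => l ++ [crop])
      else if pvFruitKw.any (fun keyword => PySem.Str.isIn keyword crop) then
        d.modify "Fruits & Nuts" [] (fun l => l ++ [crop])
      else if pvGrainKw.any (fun keyword => PySem.Str.isIn keyword crop) then
        d.modify "Grains & Forage" [] (fun l => l ++ [crop])
      else
        d.modify "Vegetables" [] (fun l => l ++ [crop]))
      (PySem.Dict.mk [("Vegetables", a), ("Fruits & Nuts", b), ("Grains & Forage", c)]) =
    PySem.Dict.mk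
      [("Vegetables", a ++ crops.filter (fun x => pvCat x == 0)),
       ("Fruits & Nuts", b ++ crops.filter (fun x => pvCat x == 1)),
       ("Grains & Forage", c ++ crops.filter (fun x => pvCat x == 2))] := by
  induction crops generalizing a b c with
  | nil => simp
  | cons x xs ih =>
      simp only [List.foldl_cons, List.filter_cons]
      by_cases h1 : pvVegKw.any (fun keyword => PySem.Str.isIn keyword x) = true
      · have hc : pvCat x = 0 := by simp only [pvCat]; rw [if_pos h1]
        rw [if_pos h1]
        have : (PySem.Dict.mk [("Vegetables", a), ("Fruits & Nuts", b), ("Grains & Forage", c)]).modify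
            "Vegetables" [] (fun l => l ++ [x]) =
            PySem.Dict.mk [("Vegetables", a ++ [x]), ("Fruits & Nuts", b), ("Grains & Forage", c)] := by
          simp [PySem.Dict.modify, PySem.Dict.insert, PySem.Dict.getD, PySem.Dict.get?, PySem.Dict.contains]
        rw [this, ih]
        simp [hc]
      · rw [if_neg h1]
        by_cases h2 : pvFruitKw.any (fun keyword => PySem.Str.isIn keyword x) = true
        · have hc : pvCat x = 1 := by simp only [pvCat]; rw [if_neg h1, if_pos h2]
          rw [if_pos h2]
          have : (PySem.Dict.mk [("Vegetables", a), ("Fruits & Nuts", b), ("Grains & Forage", c)]).modify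
              "Fruits & Nuts" [] (fun l => l ++ [x]) =
              PySem.Dict.mk [("Vegetables", a), ("Fruits & Nuts", b ++ [x]), ("Grains & Forage", c)] := by
            simp [PySem.Dict.modify, PySem.Dict.insert, PySem.Dict.getD, PySem.Dict.get?, PySem.Dict.contains]
          rw [this, ih]
          simp [hc]
        · rw [if_neg h2]
          by_cases h3 : pvGrainKw.any (fun keyword => PySem.Str.isIn keyword x) = true
          · have hc : pvCat x = 2 := by simp only [pvCat]; rw [if_neg h1, if_neg h2, if_pos h3]
            rw [if_pos h3]
            have : (PySem.Dict.mk [("Vegetables", a), ("Fruits & Nuts", b), ("Grains & Forage", c)]).modify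
                "Grains & Forage" [] (fun l => l ++ [x]) =
                PySem.Dict.mk [("Vegetables", a), ("Fruits & Nuts", b), ("Grains & Forage", c ++ [x])] := by
              simp [PySem.Dict.modify, PySem.Dict.insert, PySem.Dict.getD, PySem.Dict.get?, PySem.Dict.contains]
            rw [this, ih]
            simp [hc]
          · have hc : pvCat x = 0 := by simp only [pvCat]; rw [if_neg h1, if_neg h2, if_neg h3]
            rw [if_neg h3]
            have : (PySem.Dict.mk [("Vegetables", a), ("Fruits & Nuts", b), ("Grains & Forage", c)]).modify
                "Vegetables" [] (fun l => l ++ [x]) =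
                PySem.Dict.mk [("Vegetables", a ++ [x]), ("Fruits & Nuts", b), ("Grains & Forage", c)] := by
              simp [PySem.Dict.modify, PySem.Dict.insert, PySem.Dict.getD, PySem.Dict.get?, PySem.Dict.contains]
            rw [this, ih]
            simp [hc]

-- Sorting then filtering is filtering then sorting (stable global sort ⇒ buckets sorted).
lemma pv_filter_sorted (crops : List String) (q : String → Bool) :
    (PySem.List.sorted crops (fun x => x) false).filter q =
      PySem.List.sorted (crops.filter q) (fun x => x) false := by
  refine (PySem.List.sorted_id_eq_of_perm_of_pairwise _ _ ?_ ?_).symm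
  · exact (PySem.List.sorted_perm crops (fun x => x) false).filter q
  · exact (PySem.List.sorted_pairwise crops (fun x => x)).filter q

-- ===== VERDICT (by name: the statement is the Claim_ definition above) =====
theorem categorize_crops_spec : Claim_equal_categorize_crops := by
  intro crops _
  show categorize_crops crops = categorize_crops_alt crops
  simp only [categorize_crops, categorize_crops_alt]
  rw [pv_fold_inv]
  have hfilt : ∀ (i : Int),
      (PySem.List.sorted crops (fun x => x) false).filter (fun c => pvPriority c == i) =
        PySem.List.sorted (crops.filter (fun x => pvCat x == i)) (fun x => x) false := by
    intro i
    have : (fun c => pvPriority c == i) = (fun c => pvCat c == i) := by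
      funext c; rw [pv_priority_eq_cat]
    rw [this, pv_filter_sorted]
  simp only [List.nil_append]
  rw [show (PySem.List.enumerate pvNames) =
      [((0 : Int), "Vegetables"), (1, "Fruits & Nuts"), (2, "Grains & Forage")] from by decide]
  simp only [List.map_cons, List.map_nil]
  rw [hfilt 0, hfilt 1, hfilt 2]
  simp [PySem.Dict.keys, PySem.Dict.modify, PySem.Dict.insert, PySem.Dict.getD,
        PySem.Dict.get?, PySem.Dict.contains, PySem.Dict.ofList, PySem.Dict.update,
        PySem.Dict.empty]
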